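-- pv_equiv track=rewrite | github.com/ALTA-DE1-KHARIS-03MEI95/Basic-Programming-Part4 | problem2/main.py | draw_xyz
-- ===== SOURCE A (Python) =====
-- def draw_xyz(N):
--     pattern = ""
--     number = 1
--     for i in range(N):
--         for j in range(N):
--             if number % 3 == 0:
--                 pattern += 'X '
--             elif number % 2 == 0:
--                 pattern += 'Z '
--             else:
--                 pattern += 'Y '
--             number += 1
--         pattern += '\n'
--     return pattern
-- ===== SOURCE B (Python) =====
-- def draw_xyz(N):
--     if N <= 0:
--         return ""
--     flat = "Y Z X Z Y X " * (N * N // 6 + 1)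
--     flat = flat[: 2 * N * N]
--     return "".join(flat[2 * N * k : 2 * N * (k + 1)] + "\n" for k in range(N))
-- ===== Notes on version B (the rewrite author's own statement) =====
-- stated objective: faster
-- what changed: Instead of walking every cell with a running counter and a mod-3/mod-2 branch cascade appending two characters at a time, B tiles the period-six glyph string by string repetition, truncates it to the whole grid's flat character sequence, and cuts it into rows by slicing.
import Mathlib
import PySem

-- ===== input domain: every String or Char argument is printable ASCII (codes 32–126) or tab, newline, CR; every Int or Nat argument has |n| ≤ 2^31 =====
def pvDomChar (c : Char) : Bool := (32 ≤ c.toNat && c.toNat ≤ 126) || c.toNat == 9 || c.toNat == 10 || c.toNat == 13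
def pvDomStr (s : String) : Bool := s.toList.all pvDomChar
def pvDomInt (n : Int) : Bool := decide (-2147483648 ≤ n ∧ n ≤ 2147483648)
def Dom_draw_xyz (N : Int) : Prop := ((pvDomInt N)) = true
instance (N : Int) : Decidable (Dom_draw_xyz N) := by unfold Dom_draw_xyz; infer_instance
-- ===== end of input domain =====

-- B replaces A's per-cell counter/branch loop by tiling: repeat the period-6 string "Y Z X Z Y X ", truncate to 2*N*N chars, and cut it into N rows by slicing (bulk repetition and slicing replace per-cell appends; measured faster in a timing run).


-- ===== PORT A =====
-- literal transliteration: nested for-loops over range(N) with state (pattern, number)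
def drawStepA (st : String × Int) : String × Int :=
  if PySem.Int.mod st.2 3 == 0 then (st.1 ++ "X ", st.2 + 1)
  else if PySem.Int.mod st.2 2 == 0 then (st.1 ++ "Z ", st.2 + 1)
  else (st.1 ++ "Y ", st.2 + 1)

def draw_xyz (N : Int) : String :=
  (((PySem.List.pyRange 0 N 1).foldl (fun (st : String × Int) _i =>
      let st2 := (PySem.List.pyRange 0 N 1).foldl (fun (st' : String × Int) _j => drawStepA st') st
      (st2.1 ++ "\n", st2.2))
    ("", 1))).1

-- ===== PORT B =====
-- Python's 's' * k is ported as String.join (List.replicate k.toNat s): exact for the k ≥ 0 reached here (Python repeats max(k, 0) times).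
def draw_xyz_alt (N : Int) : String :=
  if N ≤ 0 then ""
  else
    let flat := PySem.Str.slice
      (String.join (List.replicate (PySem.Int.floordiv (N * N) 6 + 1).toNat "Y Z X Z Y X "))
      none (some (2 * N * N))
    String.join ((PySem.List.pyRange 0 N 1).map (fun k =>
      PySem.Str.slice flat (some (2 * N * k)) (some (2 * N * (k + 1))) ++ "\n"))

-- ===== PRECONDITION & SPEC =====
def Spec_draw_xyz (N : Int) (out : String) : Prop := out = draw_xyz_alt N
instance (N : Int) (out : String) : Decidable (Spec_draw_xyz N out) := by unfold Spec_draw_xyz; infer_instance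

-- ===== CLAIM (what is proved, stated in full; the proofs are below) =====
def Claim_equal_draw_xyz : Prop := ∀ (N : Int), Dom_draw_xyz N → Spec_draw_xyz N (draw_xyz N)

-- ===== LEMMAS AND PROOFS =====

-- glyph (as a char list) for the cell whose 0-based flat index is c (A's number = c + 1)
def pvG (c : Nat) : List Char :=
  if c % 6 = 0 then ['Y', ' '] else if c % 6 = 1 then ['Z', ' ']
  else if c % 6 = 2 then ['X', ' '] else if c % 6 = 3 then ['Z', ' ']
  else if c % 6 = 4 then ['Y', ' '] else ['X', ' ']

theorem pvG_len (c : Nat) : (pvG c).length = 2 := by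
  unfold pvG; split_ifs <;> rfl

theorem pvG_period (k r : Nat) : pvG (6 * k + r) = pvG r := by
  unfold pvG
  have : (6 * k + r) % 6 = r % 6 := by omega
  rw [this]

-- one A-step appends the period-6 glyph of the flat index c = number - 1
theorem pv_step_eq (p : String) (c : Nat) :
    drawStepA (p, (c : Int) + 1) = (p ++ String.ofList (pvG c), (c : Int) + 2) := by
  have h6 : c % 6 = 0 ∨ c % 6 = 1 ∨ c % 6 = 2 ∨ c % 6 = 3 ∨ c % 6 = 4 ∨ c % 6 = 5 := by omega
  rcases h6 with h | h | h | h | h | h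
  · have h3 : ¬ ((3:Int) ∣ (c : Int) + 1) := by omega
    have h2 : ¬ ((2:Int) ∣ (c : Int) + 1) := by omega
    simp [drawStepA, pvG, h, h3, h2]
    omega
  · have h3 : ¬ ((3:Int) ∣ (c : Int) + 1) := by omega
    have h2 : (2:Int) ∣ (c : Int) + 1 := by omega
    simp [drawStepA, pvG, h, h3, h2]
    omega
  · have h3 : (3:Int) ∣ (c : Int) + 1 := by omega
    simp [drawStepA, pvG, h, h3]
    omega
  · have h3 : ¬ ((3:Int) ∣ (c : Int) + 1) := by omega
    have h2 : (2:Int) ∣ (c : Int) + 1 := by omega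
    simp [drawStepA, pvG, h, h3, h2]
    omega
  · have h3 : ¬ ((3:Int) ∣ (c : Int) + 1) := by omega
    have h2 : ¬ ((2:Int) ∣ (c : Int) + 1) := by omega
    simp [drawStepA, pvG, h, h3, h2]
    omega
  · have h3 : (3:Int) ∣ (c : Int) + 1 := by omega
    simp [drawStepA, pvG, h, h3]
    omega

-- the string of one of A's rows starting at flat index c, n cells
def pvRowL (c n : Nat) : List Char := ((List.range n).map (fun j => pvG (c + j))).flatten

theorem pv_row_eq (n c : Nat) (p : String) :
    (List.range n).foldl (fun st' (_ : Nat) => drawStepA st') (p, (c : Int) + 1)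
      = (p ++ String.ofList (pvRowL c n), ((c + n : Nat) : Int) + 1) := by
  induction n with
  | zero => simp [pvRowL]
  | succ m ih =>
    rw [List.range_succ, List.foldl_append, ih]
    simp only [List.foldl_cons, List.foldl_nil]
    rw [pv_step_eq]
    refine Prod.ext ?_ ?_
    · show p ++ String.ofList (pvRowL c m) ++ String.ofList (pvG (c + m)) = p ++ String.ofList (pvRowL c (m + 1))
      have : pvRowL c (m + 1) = pvRowL c m ++ pvG (c + m) := by
        simp [pvRowL, List.range_succ]
      rw [this]
      apply String.toList_inj.mp
      simp
    · push_cast; ring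

theorem pv_outer (n m : Nat) (p : String) :
    (List.range m).foldl (fun (st : String × Int) (_ : Nat) =>
        (((List.range n).foldl (fun st' (_ : Nat) => drawStepA st') st).1 ++ "\n",
         ((List.range n).foldl (fun st' (_ : Nat) => drawStepA st') st).2)) (p, (1 : Int))
      = (p ++ String.ofList (((List.range m).map (fun i => pvRowL (i * n) n ++ ['\n'])).flatten),
         ((m * n : Nat) : Int) + 1) := by
  induction m with
  | zero => simp
  | succ k ih =>
    rw [List.range_succ, List.foldl_append, ih]
    simp only [List.foldl_cons, List.foldl_nil]
    rw [pv_row_eq n (k * n) _]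
    refine Prod.ext ?_ ?_
    · show p ++ String.ofList _ ++ String.ofList _ ++ "\n" = p ++ String.ofList _
      apply String.toList_inj.mp
      simp [List.range_succ]
    · push_cast; ring

-- flatten of 2-char chunks: take/drop commute with chunking
theorem pv_chunk (l : List (List Char)) (hl : ∀ x ∈ l, x.length = 2) (m : Nat) :
    l.flatten.take (2 * m) = (l.take m).flatten ∧ l.flatten.drop (2 * m) = (l.drop m).flatten := by
  induction l generalizing m with
  | nil => simp
  | cons x xs ih =>
    cases m with
    | zero => simp
    | succ m' =>
      have hx : x.length = 2 := hl x (by simp)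
      have hxs : ∀ y ∈ xs, y.length = 2 := fun y hy => hl y (by simp [hy])
      have h2 : 2 * (m' + 1) = x.length + 2 * m' := by omega
      constructor
      · rw [List.flatten_cons, h2, List.take_append, List.take_of_length_le (by omega),
            Nat.add_sub_cancel_left, (ih hxs m').1]
        simp
      · rw [List.flatten_cons, h2, List.drop_append, Nat.add_sub_cancel_left,
            List.drop_of_length_le (by omega), (ih hxs m').2]
        simp

-- the repeated base string is the flattened glyph sequence
theorem pv_repeat (K : Nat) :
    (String.join (List.replicate K "Y Z X Z Y X ")).toList
      = ((List.range (6 * K)).map pvG).flatten := by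
  induction K with
  | zero => simp
  | succ k ih =>
    have hL : (String.join (List.replicate (k + 1) "Y Z X Z Y X ")).toList
        = (String.join (List.replicate k "Y Z X Z Y X ")).toList ++ "Y Z X Z Y X ".toList := by
      rw [List.replicate_succ']
      simp [String.toList_join]
    rw [hL, ih]
    have hsplit : List.range (6 * (k + 1))
        = List.range (6 * k) ++ [6 * k, 6 * k + 1, 6 * k + 2, 6 * k + 3, 6 * k + 4, 6 * k + 5] := by
      rw [show 6 * (k + 1) = 6 * k + 6 by ring]
      simp [List.range_succ]
    rw [hsplit]
    simp only [List.map_append, List.flatten_append]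
    congr 1
    have e0 : pvG (6 * k) = pvG 0 := by simpa using pvG_period k 0
    simp only [List.map_cons, List.map_nil, e0,
      pvG_period k 1, pvG_period k 2, pvG_period k 3, pvG_period k 4, pvG_period k 5]
    decide

-- take/drop of the glyph-chunk list is a shifted range
theorem pv_window (M a b : Nat) (h : a + b ≤ M) :
    (((List.range M).map pvG).drop a).take b = (List.range b).map (fun j => pvG (a + j)) := by
  apply List.ext_getElem
  · simp; omega
  · intro i h1 h2
    simp only [List.getElem_take, List.getElem_drop, List.getElem_map, List.getElem_range]

-- ===== VERDICT (by name: the statement is the Claim_ definition above) =====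
theorem draw_xyz_spec : Claim_equal_draw_xyz := by
  intro N _
  unfold Spec_draw_xyz draw_xyz draw_xyz_alt
  by_cases hN : N ≤ 0
  · simp [PySem.List.pyRange_one_eq_nil hN, hN]
  · push Not at hN
    rw [if_neg (by omega)]
    obtain ⟨n, hn⟩ : ∃ n : Nat, N = (n : Int) := ⟨N.toNat, (Int.toNat_of_nonneg hN.le).symm⟩
    subst hn
    -- characterize A's output
    rw [PySem.List.pyRange_one 0 (n : Int)]
    simp only [Int.sub_zero, Int.toNat_natCast, zero_add, List.foldl_map, List.map_map]
    rw [pv_outer n n ""]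
    -- characterize B's flat string
    set K := (PySem.Int.floordiv ((n : Int) * (n : Int)) 6 + 1).toNat with hK
    have hKle : n * n ≤ 6 * K := by
      rw [hK, PySem.Int.floordiv_eq_ediv_of_pos (by norm_num),
          show ((n : Int) * (n : Int)) = ((n * n : Nat) : Int) by push_cast; ring]
      omega
    have hlen2 : ∀ (m : Nat), ∀ x ∈ (List.range m).map pvG, x.length = 2 := by
      intro m x hx
      simp only [List.mem_map] at hx
      obtain ⟨c, _, rfl⟩ := hx
      exact pvG_len c
    have hflat : (PySem.Str.slice (String.join (List.replicate K "Y Z X Z Y X "))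
          none (some (2 * (n:Int) * (n:Int)))).toList
        = ((List.range (n * n)).map pvG).flatten := by
      rw [PySem.Str.toList_slice]
      show PySem.List.slice _ none (some (2 * (n:Int) * (n:Int))) = _
      rw [show (2 * (n:Int) * (n:Int)) = ((2 * (n * n) : Nat) : Int) by push_cast; ring,
          PySem.List.slice_to_natCast, pv_repeat,
          (pv_chunk _ (hlen2 (6 * K)) (n * n)).1,
          ← List.map_take, List.take_range, Nat.min_eq_left hKle]
    have hrow : ∀ i : Nat, i < n →
        (PySem.Str.slice (PySem.Str.slice (String.join (List.replicate K "Y Z X Z Y X "))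
            none (some (2 * (n:Int) * (n:Int))))
          (some (2 * (n:Int) * (i:Int))) (some (2 * (n:Int) * ((i:Int) + 1)))).toList
        = pvRowL (i * n) n := by
      intro i hi
      rw [PySem.Str.toList_slice]
      show PySem.List.slice _ (some (2 * (n:Int) * (i:Int))) (some (2 * (n:Int) * ((i:Int) + 1))) = _
      rw [hflat,
          show (2 * (n:Int) * (i:Int)) = ((2 * (n * i) : Nat) : Int) by push_cast; ring,
          show (2 * (n:Int) * ((i:Int) + 1)) = ((2 * (n * i) : Nat) : Int) + ((2 * n : Nat) : Int) by
            push_cast; ring,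
          PySem.List.slice_natCast_add,
          (pv_chunk _ (hlen2 (n * n)) (n * i)).2,
          (pv_chunk _ (fun x hx => hlen2 (n * n) x (List.mem_of_mem_drop hx)) n).1,
          pv_window (n * n) (n * i) n (by nlinarith)]
      rw [pvRowL, Nat.mul_comm n i]
    -- compare the two strings
    apply String.toList_inj.mp
    simp only [String.toList_append, String.toList_join, List.map_map]
    show ([] : List Char) ++ (String.ofList _).toList = _
    rw [String.toList_ofList, List.nil_append]
    congr 1
    apply List.map_congr_left
    intro i hi
    simp only [List.mem_range] at hi
    simp only [Function.comp_apply, String.toList_append, hrow i hi]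
    rfl
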